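-- pv_equiv track=rewrite | github.com/chacalbl4ck/BibliaTyping-Pro | teste digitação.py | calcular_spans_palavras
-- ===== SOURCE A (Python) =====
-- def calcular_spans_palavras(texto: str):
--     """
--     Retorna:
--       - lista de palavras
--       - lista de spans (start, end) em índice de caractere
--     """
--     palavras = []
--     spans = []
--     in_word = False
--     start = 0
--     for i, ch in enumerate(texto):
--         if not ch.isspace():
--             if not in_word:
--                 in_word = True
--                 start = i
--         else:
--             if in_word:
--                 in_word = False
--                 end = i
--                 palavra = texto[start:end]
--                 palavras.append(palavra)
--                 spans.append((start, end))
--     if in_word: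
--         end = len(texto)
--         palavra = texto[start:end]
--         palavras.append(palavra)
--         spans.append((start, end))
--     return palavras, spans
-- ===== SOURCE B (Python) =====
-- def calcular_spans_palavras(texto: str):
--     """
--     Retorna:
--       - lista de palavras
--       - lista de spans (start, end) em índice de caractere
--     """
--     palavras = []
--     spans = []
--     n = len(texto)
--     i = 0
--     while i < n:
--         k = texto[i].isspace()
--         j = i + 1
--         while j < n and texto[j].isspace() == k:
--             j += 1
--         if not k:
--             palavras.append(texto[i:j])
--             spans.append((i, j))
--         i = j
--     return palavras, spans
-- ===== Notes on version B (the rewrite author's own statement) =====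
-- stated objective: alternative
-- what changed: Replaces A's per-character in_word state machine (with a trailing flush) by a two-pointer run scanner: each maximal run of same isspace-kind is consumed at once and non-space runs are emitted immediately.
import Mathlib
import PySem

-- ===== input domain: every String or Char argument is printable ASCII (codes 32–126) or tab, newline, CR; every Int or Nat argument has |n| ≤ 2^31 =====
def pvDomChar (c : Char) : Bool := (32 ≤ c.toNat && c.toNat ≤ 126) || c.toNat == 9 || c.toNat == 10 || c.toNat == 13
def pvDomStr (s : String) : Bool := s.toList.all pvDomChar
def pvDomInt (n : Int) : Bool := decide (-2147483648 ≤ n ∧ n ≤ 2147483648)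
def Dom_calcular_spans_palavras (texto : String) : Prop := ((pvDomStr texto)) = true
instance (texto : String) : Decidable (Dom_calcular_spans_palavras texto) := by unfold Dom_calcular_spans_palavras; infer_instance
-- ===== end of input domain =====

-- B replaces A's per-character in_word state machine (with trailing flush) by a two-pointer
-- run scanner that consumes each maximal same-isspace-kind run at once; alternative, same cost.

-- ===== PORT A =====
-- loop body of A's 'for i, ch in enumerate(texto)'
def pvStepA (full : List Char)
    (st : (List String × List (Int × Int)) × Bool × Int) (p : Int × Char) :
    (List String × List (Int × Int)) × Bool × Int :=
  let palavras := st.1.1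
  let spans := st.1.2
  let in_word := st.2.1
  let start := st.2.2
  if ¬ PySem.Chars.isspace p.2 then
    if ¬ in_word then ((palavras, spans), true, p.1) else st
  else
    if in_word then
      ((palavras ++ [String.ofList (PySem.List.slice full (some start) (some p.1))],
        spans ++ [(start, p.1)]), false, start)
    else st

-- trailing 'if in_word:' flush
def pvFinishA (full : List Char)
    (st : (List String × List (Int × Int)) × Bool × Int) :
    List String × List (Int × Int) :=
  if st.2.1 then
    (st.1.1 ++ [String.ofList (PySem.List.slice full (some st.2.2) (some (full.length : Int)))],
     st.1.2 ++ [(st.2.2, (full.length : Int))])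
  else st.1

def calcular_spans_palavras (texto : String) : List String × (List (Int × Int)) :=
  let cs := texto.toList
  pvFinishA cs ((PySem.List.enumerate cs 0).foldl (pvStepA cs) (([], []), false, 0))

-- ===== PORT B =====
-- Source B's outer while loop: at position idx the remaining suffix is cs; the inner
-- 'while j < n and texto[j].isspace() == k' is the takeWhile/dropWhile split of the
-- rest, and texto[i:j] is exactly the consumed run c :: run.
def pvGoB (cs : List Char) (idx : Int) : List String × List (Int × Int) :=
  match cs with
  | [] => ([], [])
  | c :: rest =>
    let k := PySem.Chars.isspace c
    let run := rest.takeWhile (fun d => PySem.Chars.isspace d == k)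
    let j : Int := idx + 1 + (run.length : Int)
    let tail := pvGoB (rest.dropWhile (fun d => PySem.Chars.isspace d == k)) j
    if k then tail
    else (String.ofList (c :: run) :: tail.1, (idx, j) :: tail.2)
termination_by cs.length
decreasing_by
  simpa using Nat.lt_succ_of_le (List.length_dropWhile_le _ _)

def calcular_spans_palavras_alt (texto : String) : List String × (List (Int × Int)) :=
  pvGoB texto.toList 0

-- ===== PRECONDITION & SPEC =====
def Spec_calcular_spans_palavras (texto : String) (out : List String × (List (Int × Int))) : Prop := out = calcular_spans_palavras_alt texto
instance (texto : String) (out : List String × (List (Int × Int))) : Decidable (Spec_calcular_spans_palavras texto out) := by unfold Spec_calcular_spans_palavras; infer_instance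

-- ===== CLAIM (what is proved, stated in full; the proofs are below) =====
def Claim_equal_calcular_spans_palavras : Prop := ∀ (texto : String), Dom_calcular_spans_palavras texto → Spec_calcular_spans_palavras texto (calcular_spans_palavras texto)

-- ===== LEMMAS AND PROOFS =====

-- the head of a dropWhile result falsifies the predicate
lemma pvDropWhile_head_false {p : Char → Bool} {l : List Char} {c : Char} {t : List Char}
    (h : l.dropWhile p = c :: t) : p c = false := by
  induction l with
  | nil => simp at h
  | cons a l ih =>
    rw [List.dropWhile_cons] at h
    by_cases ha : p a = true
    · rw [if_pos ha] at h; exact ih h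
    · rw [if_neg ha] at h
      cases h
      simpa using ha

-- skipping one leading space character does not change B's result
lemma pvGoB_space (c : Char) (rest : List Char) (idx : Int)
    (hc : PySem.Chars.isspace c = true) :
    pvGoB (c :: rest) idx = pvGoB rest (idx + 1) := by
  match rest with
  | [] => simp [pvGoB, hc]
  | c' :: t =>
    by_cases hc' : PySem.Chars.isspace c' = true
    · rw [pvGoB, pvGoB]
      simp only [hc, hc', List.takeWhile_cons, List.dropWhile_cons, if_true, beq_true]
      simp [List.length_cons]
      ring_nf
    · conv_lhs => rw [pvGoB]
      simp [hc, hc']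

-- A's loop is the identity across a non-space run while in_word is set
lemma pvFoldA_id_word (full : List Char) (ws : List Char)
    (hw : ∀ d ∈ ws, PySem.Chars.isspace d = false) (n : Int)
    (acc : List String × List (Int × Int)) (m : Int) :
    (PySem.List.enumerate ws n).foldl (pvStepA full) ((acc, true, m)) = ((acc, true, m)) := by
  induction ws generalizing n with
  | nil => simp [PySem.List.enumerate_nil]
  | cons d ds ih =>
    rw [PySem.List.enumerate_cons, List.foldl_cons]
    have hd := hw d (by simp)
    simp only [pvStepA, hd]
    simp only [Bool.not_false, if_true, ite_true, Bool.false_eq_true, not_false_iff]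
    exact ih (fun x hx => hw x (by simp [hx])) (n + 1)

lemma pvMain (full : List Char) :
    ∀ (n : Nat) (accw : List String) (accs : List (Int × Int)) (s : Int),
      pvFinishA full ((PySem.List.enumerate (full.drop n) (n : Int)).foldl (pvStepA full)
        ((accw, accs), false, s))
      = (accw ++ (pvGoB (full.drop n) (n : Int)).1, accs ++ (pvGoB (full.drop n) (n : Int)).2) := by
  suffices H : ∀ (m n : Nat) (accw : List String) (accs : List (Int × Int)) (s : Int),
      full.length - n = m →
      pvFinishA full ((PySem.List.enumerate (full.drop n) (n : Int)).foldl (pvStepA full)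
        ((accw, accs), false, s))
      = (accw ++ (pvGoB (full.drop n) (n : Int)).1, accs ++ (pvGoB (full.drop n) (n : Int)).2) by
    intro n accw accs s; exact H _ n accw accs s rfl
  intro m
  induction m using Nat.strong_induction_on with
  | _ m IH =>
  intro n accw accs s hm
  rcases hdrop : full.drop n with _ | ⟨c, rest⟩
  · simp [PySem.List.enumerate_nil, pvFinishA, pvGoB]
  · have hnlt : n < full.length := by
      by_contra h
      push_neg at h
      rw [List.drop_eq_nil_iff.mpr h] at hdrop
      simp at hdrop
    have hrest : full.drop (n + 1) = rest := by
      have h1 : (full.drop n).drop 1 = full.drop (n + 1) := List.drop_drop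
      rw [← h1, hdrop]
      simp
    rw [PySem.List.enumerate_cons, List.foldl_cons]
    by_cases hc : PySem.Chars.isspace c = true
    · have hstep : pvStepA full ((accw, accs), false, s) ((n : Int), c) = ((accw, accs), false, s) := by
        simp [pvStepA, hc]
      rw [hstep]
      have hcast : (n : Int) + 1 = ((n + 1 : Nat) : Int) := by push_cast; ring
      rw [pvGoB_space c rest (n : Int) hc, hcast, ← hrest]
      exact IH (full.length - (n + 1)) (by omega) (n + 1) accw accs s rfl
    · have hcF : PySem.Chars.isspace c = false := by simpa using hc
      have hstep : pvStepA full ((accw, accs), false, s) ((n : Int), c) = ((accw, accs), true, (n : Int)) := by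
        simp [pvStepA, hcF]
      rw [hstep]
      have hpred : (fun d => PySem.Chars.isspace d == PySem.Chars.isspace c)
          = (fun d => !PySem.Chars.isspace d) := by
        funext d; rw [hcF]; cases PySem.Chars.isspace d <;> rfl
      set run := rest.takeWhile (fun d => !PySem.Chars.isspace d) with hrun
      set rest' := rest.dropWhile (fun d => !PySem.Chars.isspace d) with hrest'
      have hsplit : run ++ rest' = rest := List.takeWhile_append_dropWhile
      have hgob : pvGoB (c :: rest) (n : Int) =
          (String.ofList (c :: run) :: (pvGoB rest' ((n : Int) + 1 + (run.length : Int))).1,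
           ((n : Int), (n : Int) + 1 + (run.length : Int))
             :: (pvGoB rest' ((n : Int) + 1 + (run.length : Int))).2) := by
        rw [pvGoB]
        rw [hrun, hrest']
        simp [hcF, hpred]
      rw [hgob]
      have hlenrest : full.length - n = rest.length + 1 := by
        have := congrArg List.length hdrop
        simp [List.length_drop] at this
        omega
      have hslice : PySem.List.slice full (some (n : Int)) (some ((n + 1 + run.length : Nat) : Int))
          = c :: run := by
        rw [PySem.List.slice_natCast, hdrop]
        have h2 : n + 1 + run.length - n = run.length + 1 := by omega
        rw [h2, ← hsplit]
        simp
      rw [show rest = run ++ rest' from hsplit.symm, PySem.List.enumerate_append, List.foldl_append]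
      have hallrun : ∀ d ∈ run, PySem.Chars.isspace d = false := by
        intro d hd
        rw [hrun] at hd
        have := List.mem_takeWhile_imp hd
        simpa using this
      rw [pvFoldA_id_word full run hallrun ((n : Int) + 1) (accw, accs) (n : Int)]
      have hE : (n : Int) + 1 + ((run.length : Nat) : Int) = ((n + 1 + run.length : Nat) : Int) := by
        push_cast; ring
      have hdropE : full.drop (n + 1 + run.length) = rest' := by
        have h1 : (full.drop (n + 1)).drop run.length = full.drop (n + 1 + run.length) :=
          List.drop_drop
        rw [← h1, hrest, ← hsplit]
        simp
      rcases hr' : rest' with _ | ⟨c', t⟩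
      · -- the string ends inside a word: A's trailing flush emits the last word
        have hrun_eq : run = rest := by rw [← hsplit, hr']; simp
        have hlen : full.length = n + 1 + run.length := by
          rw [hrun_eq]; omega
        simp only [PySem.List.enumerate_nil, List.foldl_nil]
        rw [show pvFinishA full ((accw, accs), true, (n : Int)) =
            (accw ++ [String.ofList (PySem.List.slice full (some (n : Int))
                (some (full.length : Int)))],
             accs ++ [((n : Int), (full.length : Int))]) from by simp [pvFinishA]]
        rw [hlen, hslice, ← hE]
        simp [pvGoB]
      · have h2 : rest.dropWhile (fun d => !PySem.Chars.isspace d) = c' :: t := by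
          rw [← hrest']; exact hr'
        have hc' : PySem.Chars.isspace c' = true := by
          have := pvDropWhile_head_false h2
          simpa using this
        rw [hE, PySem.List.enumerate_cons, List.foldl_cons]
        have hstep2 : pvStepA full ((accw, accs), true, (n : Int))
            (((n + 1 + run.length : Nat) : Int), c') =
            ((accw ++ [String.ofList (PySem.List.slice full (some (n : Int))
                (some ((n + 1 + run.length : Nat) : Int)))],
              accs ++ [((n : Int), ((n + 1 + run.length : Nat) : Int))]), false, (n : Int)) := by
          simp [pvStepA, hc']
        rw [hstep2]
        have hcast2 : ((n + 1 + run.length : Nat) : Int) + 1 = ((n + 1 + run.length + 1 : Nat) : Int) := by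
          push_cast; ring
        have hdropE1 : full.drop (n + 1 + run.length + 1) = t := by
          have h1 : (full.drop (n + 1 + run.length)).drop 1 = full.drop (n + 1 + run.length + 1) :=
            List.drop_drop
          rw [← h1, hdropE, hr']
          simp
        rw [hcast2, ← hdropE1]
        rw [IH (full.length - (n + 1 + run.length + 1)) (by omega) (n + 1 + run.length + 1)
          _ _ (n : Int) rfl]
        rw [hdropE1, hslice]
        rw [pvGoB_space c' t _ hc', hcast2]
        simp


-- ===== VERDICT (by name: the statement is the Claim_ definition above) =====
theorem calcular_spans_palavras_spec : Claim_equal_calcular_spans_palavras := by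
  intro texto _
  unfold Spec_calcular_spans_palavras calcular_spans_palavras calcular_spans_palavras_alt
  simpa using pvMain texto.toList 0 [] [] 0
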